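-- pv_equiv track=rewrite | github.com/Dadudekc/SWARM | dreamos/core/utils/testing_utils.py | parse_test_failures
-- ===== SOURCE A (Python) =====
-- from typing import Dict
--
-- def parse_test_failures(output: str) -> Dict[str, str]:
--     """Parse pytest output and return a mapping of test names to errors."""
--     failures: Dict[str, str] = {}
--     current_test = None
--     error_lines = []
--
--     for line in output.splitlines():
--         if line.startswith("FAILED"):
--             if current_test:
--                 failures[current_test] = "\n".join(error_lines)
--             parts = line.split()
--             if len(parts) >= 2:
--                 current_test = parts[1].split("::")[-1]
--             else:
--                 current_test = line.split("::")[-1].strip()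
--             error_lines = []
--         elif current_test and line.strip():
--             error_lines.append(line)
--             if line.startswith("AssertionError") or line.startswith("Error"):
--                 failures[current_test] = "\n".join(error_lines)
--                 current_test = None
--                 error_lines = []
--
--     if current_test:
--         failures[current_test] = "\n".join(error_lines)
--
--     return failures
-- ===== SOURCE B (Python) =====
-- def _split_blocks(lines):
--     """Carve lines into (header, body) blocks, one per line starting with FAILED."""
--     blocks = []
--     while lines:
--         if lines[0].startswith("FAILED"):
--             k = 1
--             while k < len(lines) and not lines[k].startswith("FAILED"):
--                 k += 1
--             blocks.append((lines[0], lines[1:k]))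
--             lines = lines[k:]
--         else:
--             lines = lines[1:]
--     return blocks
--
--
-- def _test_name(header):
--     parts = header.split()
--     if len(parts) >= 2:
--         return parts[1].split("::")[-1]
--     return header.split("::")[-1].strip()
--
--
-- def _error_text(body):
--     errs = []
--     for ln in body:
--         if ln.strip():
--             errs.append(ln)
--             if ln.startswith("AssertionError") or ln.startswith("Error"):
--                 break
--     return "\n".join(errs)
--
--
-- def parse_test_failures(output: str):
--     failures = {}
--     for header, body in _split_blocks(output.splitlines()):
--         name = _test_name(header)
--         if name:
--             failures[name] = _error_text(body)
--     return failures
-- ===== Notes on version B (the rewrite author's own statement) =====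
-- stated objective: alternative
-- what changed: A is a single-pass state machine carrying (current_test, error_lines) across all lines; B is a two-phase pipeline that first carves the split lines into per-FAILED blocks (takeWhile/dropWhile on the FAILED marker) and then independently computes each block's test name and error text.
import Mathlib
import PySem

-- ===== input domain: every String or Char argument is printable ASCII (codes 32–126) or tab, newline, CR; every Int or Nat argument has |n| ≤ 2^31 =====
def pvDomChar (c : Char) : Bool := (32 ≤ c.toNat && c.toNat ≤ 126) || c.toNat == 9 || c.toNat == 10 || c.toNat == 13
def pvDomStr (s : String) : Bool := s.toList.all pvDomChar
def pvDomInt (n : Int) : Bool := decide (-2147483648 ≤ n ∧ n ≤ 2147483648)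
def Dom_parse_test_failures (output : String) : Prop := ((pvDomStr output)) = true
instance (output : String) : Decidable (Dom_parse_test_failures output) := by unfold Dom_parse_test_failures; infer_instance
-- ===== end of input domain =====

-- B re-implements A's one-pass state machine as a two-phase pipeline (carve the output into
-- per-FAILED blocks, then name/error-text each block); objective: alternative decomposition, same cost.


-- ===== PORT A =====
-- A's loop state is (failures, current_test, error_lines); current_test : Option String and
-- Python truthiness of current_test = 'some non-empty string'.
def pvTruthy (c : Option String) : Bool :=
  match c with
  | some s => s != ""
  | none => false

-- A's 'if current_test: failures[current_test] = "\n".join(error_lines)' flush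
def pvFlushA (st : PySem.Dict String String × Option String × List String) :
    PySem.Dict String String :=
  match st with
  | (d, some s, errs) => if s != "" then d.insert s (PySem.Str.join "\n" errs) else d
  | (d, none, _) => d

-- one iteration of A's 'for line in output.splitlines()' body
def pvStepA (st : PySem.Dict String String × Option String × List String) (line : String) :
    PySem.Dict String String × Option String × List String :=
  if PySem.Str.startswith line "FAILED" then
    let parts := PySem.Str.split₀ line
    let cur :=
      if parts.length ≥ 2 then
        -- parts[1] is in range here (length ≥ 2), so getD 1 "" is exact
        ((PySem.Str.split? (parts.getD 1 "") "::").getD []).getLastD ""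
      else
        PySem.Str.strip (((PySem.Str.split? line "::").getD []).getLastD "")
    (pvFlushA st, some cur, [])
  else
    match st with
    | (d, c, errs) =>
      if pvTruthy c && (PySem.Str.strip line != "") then
        let errs' := errs ++ [line]
        if PySem.Str.startswith line "AssertionError" || PySem.Str.startswith line "Error" then
          (d.insert (c.getD "") (PySem.Str.join "\n" errs'), none, [])
        else (d, c, errs')
      else (d, c, errs)

def parse_test_failures (output : String) : List (String × String) :=
  (pvFlushA ((PySem.Str.splitlines output).foldl pvStepA (PySem.Dict.empty, none, []))).items

-- ===== PORT B =====
-- Source B _split_blocks: the inner index scan 'while k < len(lines) and not startswith' together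
-- with the slices lines[1:k] / lines[k:] is ported as takeWhile / dropWhile (exact)
def pvSplitBlocks : List String → List (String × List String)
  | [] => []
  | l :: ls =>
    if PySem.Str.startswith l "FAILED" then
      (l, ls.takeWhile (fun x => !PySem.Str.startswith x "FAILED")) ::
        pvSplitBlocks (ls.dropWhile (fun x => !PySem.Str.startswith x "FAILED"))
    else pvSplitBlocks ls
termination_by l => l.length
decreasing_by
  · have := List.length_dropWhile_le (fun x => !PySem.Str.startswith x "FAILED") ls
    simp only [List.length_cons]; omega
  · simp only [List.length_cons]; omega

-- Source B _test_name
def pvTestNameB (header : String) : String :=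
  let parts := PySem.Str.split₀ header
  if parts.length ≥ 2 then
    -- parts[1] is in range here (length ≥ 2), so getD 1 "" is exact
    ((PySem.Str.split? (parts.getD 1 "") "::").getD []).getLastD ""
  else
    PySem.Str.strip (((PySem.Str.split? header "::").getD []).getLastD "")

-- Source B _error_text's loop with break, as structural recursion collecting the kept lines
def pvErrsB : List String → List String
  | [] => []
  | x :: xs =>
    if PySem.Str.strip x != "" then
      if PySem.Str.startswith x "AssertionError" || PySem.Str.startswith x "Error" then [x]
      else x :: pvErrsB xs
    else pvErrsB xs

def pvErrTextB (body : List String) : String := PySem.Str.join "\n" (pvErrsB body)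

-- Source B's main loop body over the blocks
def pvBlockStepB (d : PySem.Dict String String) (hb : String × List String) :
    PySem.Dict String String :=
  let name := pvTestNameB hb.1
  if name != "" then d.insert name (pvErrTextB hb.2) else d

def parse_test_failures_alt (output : String) : List (String × String) :=
  ((pvSplitBlocks (PySem.Str.splitlines output)).foldl pvBlockStepB PySem.Dict.empty).items

-- ===== PRECONDITION & SPEC =====
def Spec_parse_test_failures (output : String) (out : List (String × String)) : Prop := out = parse_test_failures_alt output
instance (output : String) (out : List (String × String)) : Decidable (Spec_parse_test_failures output out) := by unfold Spec_parse_test_failures; infer_instance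

-- ===== CLAIM (what is proved, stated in full; the proofs are below) =====
def Claim_equal_parse_test_failures : Prop := ∀ (output : String), Dom_parse_test_failures output → Spec_parse_test_failures output (parse_test_failures output)

-- ===== LEMMAS AND PROOFS =====

-- the head of a dropWhile falsifies the predicate
theorem pv_dropWhile_head_false {α : Type} (p : α → Bool) :
    ∀ (l : List α) (r : α) (rs : List α), l.dropWhile p = r :: rs → p r = false := by
  intro l
  induction l with
  | nil => intro r rs h; simp [List.dropWhile] at h
  | cons x xs ih =>
    intro r rs h
    by_cases hx : p x
    · rw [List.dropWhile_cons_of_pos hx] at h; exact ih r rs h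
    · rw [List.dropWhile_cons_of_neg hx] at h
      cases h; simpa using hx

-- unfolding lemmas for A's step, one per branch of the Python loop body
theorem pvStepA_failed (st : PySem.Dict String String × Option String × List String)
    (l : String) (h : PySem.Str.startswith l "FAILED" = true) :
    pvStepA st l = (pvFlushA st, some (pvTestNameB l), []) := by
  unfold pvStepA pvTestNameB; rw [if_pos h]

theorem pvStepA_skip (d : PySem.Dict String String) (c : Option String) (e : List String)
    (l : String) (hl : PySem.Str.startswith l "FAILED" = false) (hc : pvTruthy c = false) :
    pvStepA (d, c, e) l = (d, c, e) := by
  unfold pvStepA; rw [hl]; simp [hc]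

theorem pvStepA_blank (d : PySem.Dict String String) (c : Option String) (e : List String)
    (l : String) (hl : PySem.Str.startswith l "FAILED" = false) (hs : PySem.Str.strip l = "") :
    pvStepA (d, c, e) l = (d, c, e) := by
  unfold pvStepA; rw [hl]; simp [hs]

theorem pvStepA_err (d : PySem.Dict String String) (nm : String) (e : List String)
    (l : String) (hl : PySem.Str.startswith l "FAILED" = false) (hnm : nm ≠ "")
    (herr : (PySem.Str.startswith l "AssertionError" || PySem.Str.startswith l "Error") = true)
    (hs : PySem.Str.strip l ≠ "") :
    pvStepA (d, some nm, e) l = (d.insert nm (PySem.Str.join "\n" (e ++ [l])), none, []) := by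
  unfold pvStepA; rw [hl]
  simp at herr
  simp [pvTruthy, hnm, hs]
  intro hA
  rcases herr with h1 | h2
  · rw [h1] at hA; exact absurd hA (by simp)
  · exact h2

theorem pvStepA_acc (d : PySem.Dict String String) (nm : String) (e : List String)
    (l : String) (hl : PySem.Str.startswith l "FAILED" = false) (hnm : nm ≠ "")
    (herr : (PySem.Str.startswith l "AssertionError" || PySem.Str.startswith l "Error") = false)
    (hs : PySem.Str.strip l ≠ "") :
    pvStepA (d, some nm, e) l = (d, some nm, e ++ [l]) := by
  unfold pvStepA; rw [hl]
  simp at herr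
  simp [pvTruthy, hnm, hs]
  exact herr

-- unfolding lemmas for B's error collector
theorem pvErrsB_blank (x : String) (xs : List String) (hs : PySem.Str.strip x = "") :
    pvErrsB (x :: xs) = pvErrsB xs := by
  simp only [pvErrsB]
  rw [if_neg (by simp [hs])]

theorem pvErrsB_err (x : String) (xs : List String) (hs : PySem.Str.strip x ≠ "")
    (herr : (PySem.Str.startswith x "AssertionError" || PySem.Str.startswith x "Error") = true) :
    pvErrsB (x :: xs) = [x] := by
  simp only [pvErrsB]
  rw [if_pos (by simp [hs]), if_pos herr]

theorem pvErrsB_acc (x : String) (xs : List String) (hs : PySem.Str.strip x ≠ "")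
    (herr : (PySem.Str.startswith x "AssertionError" || PySem.Str.startswith x "Error") = false) :
    pvErrsB (x :: xs) = x :: pvErrsB xs := by
  simp only [pvErrsB]
  rw [if_pos (by simp [hs]), if_neg (by simp; simpa using herr)]

-- flush on the three shapes of state
theorem pvFlushA_none (d : PySem.Dict String String) (e : List String) :
    pvFlushA (d, none, e) = d := rfl

theorem pvFlushA_empty (d : PySem.Dict String String) (e : List String) :
    pvFlushA (d, some "", e) = d := rfl

theorem pvFlushA_some (d : PySem.Dict String String) (nm : String) (hnm : nm ≠ "")
    (e : List String) : pvFlushA (d, some nm, e) = d.insert nm (PySem.Str.join "\n" e) := by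
  simp [pvFlushA, hnm]

-- a run of non-FAILED lines is a no-op while current_test is falsy
theorem pvFoldA_skip (c : Option String) (hc : pvTruthy c = false) :
    ∀ (ls : List String), (∀ x ∈ ls, PySem.Str.startswith x "FAILED" = false) →
    ∀ (d : PySem.Dict String String) (e : List String),
      ls.foldl pvStepA (d, c, e) = (d, c, e) := by
  intro ls
  induction ls with
  | nil => intro _ d e; rfl
  | cons x xs ih =>
    intro hall d e
    rw [List.foldl_cons, pvStepA_skip d c e x (hall x (by simp)) hc]
    exact ih (fun y hy => hall y (by simp [hy])) d e

-- A's invariant inside one block with a non-empty current test: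
-- flushing after the block inserts exactly the block's collected error text
theorem pvInnerA :
    ∀ (body : List String), (∀ x ∈ body, PySem.Str.startswith x "FAILED" = false) →
    ∀ (d : PySem.Dict String String) (nm : String), nm ≠ "" → ∀ (errs : List String),
      pvFlushA (body.foldl pvStepA (d, some nm, errs)) =
        d.insert nm (PySem.Str.join "\n" (errs ++ pvErrsB body)) := by
  intro body
  induction body with
  | nil => intro _ d nm hnm errs; simp [pvErrsB, pvFlushA_some d nm hnm errs]
  | cons x xs ih =>
    intro hall d nm hnm errs
    have hxF : PySem.Str.startswith x "FAILED" = false := hall x (by simp)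
    have hxs : ∀ y ∈ xs, PySem.Str.startswith y "FAILED" = false :=
      fun y hy => hall y (by simp [hy])
    rw [List.foldl_cons]
    by_cases hs : PySem.Str.strip x = ""
    · rw [pvStepA_blank d (some nm) errs x hxF hs, ih hxs d nm hnm errs,
        pvErrsB_blank x xs hs]
    · by_cases herr : (PySem.Str.startswith x "AssertionError" ||
          PySem.Str.startswith x "Error") = true
      · rw [pvStepA_err d nm errs x hxF hnm herr hs, pvFoldA_skip none rfl xs hxs,
          pvFlushA_none, pvErrsB_err x xs hs herr]
      · rw [pvStepA_acc d nm errs x hxF hnm (by simpa using herr) hs,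
          ih hxs d nm hnm (errs ++ [x]), pvErrsB_acc x xs hs (by simpa using herr),
          List.append_assoc]
        rfl

-- main correspondence: A's flushed fold over the lines = B's fold over the carved blocks
theorem pvMainA :
    ∀ (ls : List String) (d : PySem.Dict String String),
      pvFlushA (ls.foldl pvStepA (d, none, [])) = (pvSplitBlocks ls).foldl pvBlockStepB d := by
  intro ls
  induction ls using pvSplitBlocks.induct with
  | case1 => intro d; rw [pvSplitBlocks]; rfl
  | case2 l ls hF ih =>
    intro d
    have hsplit : pvSplitBlocks (l :: ls) =
        (l, ls.takeWhile (fun x => !PySem.Str.startswith x "FAILED")) ::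
          pvSplitBlocks (ls.dropWhile (fun x => !PySem.Str.startswith x "FAILED")) := by
      rw [pvSplitBlocks, if_pos hF]
    have hbodyNF : ∀ x ∈ ls.takeWhile (fun x => !PySem.Str.startswith x "FAILED"),
        PySem.Str.startswith x "FAILED" = false := by
      intro x hx
      simpa using List.mem_takeWhile_imp hx
    rw [List.foldl_cons, pvStepA_failed _ l hF, pvFlushA_none, hsplit, List.foldl_cons]
    rw [show ls.foldl pvStepA (d, some (pvTestNameB l), []) =
        ((ls.takeWhile (fun x => !PySem.Str.startswith x "FAILED") ++
          ls.dropWhile (fun x => !PySem.Str.startswith x "FAILED")).foldl pvStepA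
            (d, some (pvTestNameB l), [])) from by rw [List.takeWhile_append_dropWhile]]
    rw [List.foldl_append]
    by_cases hnm : pvTestNameB l = ""
    · -- empty test name: the block is ignored by both programs
      have hskip := pvFoldA_skip (some "") rfl _ hbodyNF d []
      rw [hnm, hskip]
      have hbs : pvBlockStepB d (l, ls.takeWhile (fun x => !PySem.Str.startswith x "FAILED")) =
          d := by
        simp only [pvBlockStepB]
        rw [if_neg (by simp [hnm])]
      rw [hbs]
      cases hrest : ls.dropWhile (fun x => !PySem.Str.startswith x "FAILED") with
      | nil => rw [pvSplitBlocks]; exact pvFlushA_empty d []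
      | cons r rs =>
        have hrF : PySem.Str.startswith r "FAILED" = true := by
          simpa using pv_dropWhile_head_false _ ls r rs hrest
        rw [List.foldl_cons, pvStepA_failed _ r hrF, pvFlushA_empty]
        have h2 := ih d
        rw [hrest, List.foldl_cons, pvStepA_failed _ r hrF, pvFlushA_none] at h2
        exact h2
    · -- non-empty test name: the block inserts its error text in both programs
      have hin := pvInnerA _ hbodyNF d (pvTestNameB l) hnm []
      rw [List.nil_append] at hin
      have hbs : pvBlockStepB d (l, ls.takeWhile (fun x => !PySem.Str.startswith x "FAILED")) =
          d.insert (pvTestNameB l)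
            (PySem.Str.join "\n"
              (pvErrsB (ls.takeWhile (fun x => !PySem.Str.startswith x "FAILED")))) := by
        simp only [pvBlockStepB]
        rw [if_pos (by simp [hnm])]
        rfl
      rw [hbs]
      cases hrest : ls.dropWhile (fun x => !PySem.Str.startswith x "FAILED") with
      | nil => rw [pvSplitBlocks]; exact hin
      | cons r rs =>
        have hrF : PySem.Str.startswith r "FAILED" = true := by
          simpa using pv_dropWhile_head_false _ ls r rs hrest
        rw [List.foldl_cons, pvStepA_failed _ r hrF, hin]
        have h2 := ih (d.insert (pvTestNameB l)
          (PySem.Str.join "\n" (pvErrsB (ls.takeWhile (fun x => !PySem.Str.startswith x "FAILED")))))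
        rw [hrest, List.foldl_cons, pvStepA_failed _ r hrF, pvFlushA_none] at h2
        exact h2
  | case3 l ls hF ih =>
    intro d
    have hF' : PySem.Str.startswith l "FAILED" = false := by
      cases h : PySem.Str.startswith l "FAILED" with
      | true => exact absurd h hF
      | false => rfl
    rw [List.foldl_cons, pvStepA_skip d none [] l hF' rfl, pvSplitBlocks, if_neg hF]
    exact ih d

-- ===== VERDICT (by name: the statement is the Claim_ definition above) =====
theorem parse_test_failures_spec : Claim_equal_parse_test_failures := by
  intro output _
  unfold Spec_parse_test_failures parse_test_failures parse_test_failures_alt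
  rw [pvMainA]
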